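-- pv_equiv track=rewrite | github.com/meng-ze/Foobar-Challenge | lv3_bomb_baby.py | gcd_with_counter
-- ===== SOURCE A (Python) =====
-- def gcd_with_counter(m, f):
--     larger = max(m, f)
--     smaller = min(m, f)
--     remainder = larger % smaller
--     if remainder == 0:
--         if smaller != 1:
--             return -1
--         return larger//smaller
--     result = gcd_with_counter(remainder, smaller)
--     if result != -1:
--         return result + larger//smaller
--     return -1
-- ===== SOURCE B (Python) =====
-- def gcd_with_counter(m, f):
--     larger, smaller = max(m, f), min(m, f)
--     total = 0
--     while True:
--         total += larger // smaller
--         remainder = larger % smaller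
--         if remainder == 0:
--             return total if smaller == 1 else -1
--         larger, smaller = smaller, remainder
-- ===== Notes on version B (the rewrite author's own statement) =====
-- stated objective: simpler
-- what changed: Replaces the accumulate-on-return recursion with a single iterative loop that keeps a running quotient total, removing recursion (and its depth limit) entirely.
import Mathlib
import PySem

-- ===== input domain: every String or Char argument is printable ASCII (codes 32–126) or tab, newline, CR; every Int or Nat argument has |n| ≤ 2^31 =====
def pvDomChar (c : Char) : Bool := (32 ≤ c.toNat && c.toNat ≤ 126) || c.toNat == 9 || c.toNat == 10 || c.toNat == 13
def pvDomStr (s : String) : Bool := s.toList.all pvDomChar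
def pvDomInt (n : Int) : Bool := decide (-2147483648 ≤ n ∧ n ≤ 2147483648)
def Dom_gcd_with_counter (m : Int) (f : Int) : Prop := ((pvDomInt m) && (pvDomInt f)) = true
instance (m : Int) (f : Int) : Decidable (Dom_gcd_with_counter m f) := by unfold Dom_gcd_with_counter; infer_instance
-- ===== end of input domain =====

-- B replaces A's accumulate-on-return recursion with a single iterative loop carrying a running quotient total (objective: simpler).


-- ===== PORT A =====
-- Literal port of A's recursion; the Nat fuel only totalizes it (0 = junk, never
-- reached on Pre_ inputs): each recursive call strictly decreases min of the pair.
def gcdA : Nat → Int → Int → Int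
  | 0, _, _ => 0
  | fuel+1, m, f =>
    let larger := max m f
    let smaller := min m f
    let remainder := PySem.Int.mod larger smaller
    if remainder == 0 then
      if smaller != 1 then -1 else PySem.Int.floordiv larger smaller
    else
      let result := gcdA fuel remainder smaller
      if result != -1 then result + PySem.Int.floordiv larger smaller else -1

def gcd_with_counter (m : Int) (f : Int) : Int := gcdA ((min m f).toNat + 1) m f

-- ===== PORT B =====
-- Literal port of Source B's while-loop, with the same fuel totalization.
def gcdBLoop : Nat → Int → Int → Int → Int
  | 0, _, _, _ => 0
  | fuel+1, larger, smaller, total =>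
    let total := total + PySem.Int.floordiv larger smaller
    let remainder := PySem.Int.mod larger smaller
    if remainder == 0 then
      (if smaller == 1 then total else -1)
    else gcdBLoop fuel smaller remainder total

def gcd_with_counter_alt (m : Int) (f : Int) : Int :=
  gcdBLoop ((min m f).natAbs + 1) (max m f) (min m f) 0

-- ===== PRECONDITION & SPEC =====
-- Pre_ is exactly where Python A returns: both arguments positive (ordinary Euclid),
-- or min < 0 dividing max (first remainder is 0, A returns -1 immediately).
-- Elsewhere A raises: ZeroDivisionError when min = 0, RecursionError otherwise.
def Pre_gcd_with_counter (m : Int) (f : Int) : Prop :=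
  (1 ≤ m ∧ 1 ≤ f) ∨ (min m f < 0 ∧ min m f ∣ max m f)
instance (m : Int) (f : Int) : Decidable (Pre_gcd_with_counter m f) := by
  unfold Pre_gcd_with_counter; infer_instance
def pvWitness_gcd_with_counter : Int × Int := (4, 6)

def Spec_gcd_with_counter (m : Int) (f : Int) (out : Int) : Prop := out = gcd_with_counter_alt m f
instance (m : Int) (f : Int) (out : Int) : Decidable (Spec_gcd_with_counter m f out) := by unfold Spec_gcd_with_counter; infer_instance

-- ===== CLAIM (what is proved, stated in full; the proofs are below) =====
def Claim_equal_gcd_with_counter : Prop := ∀ (m : Int) (f : Int), Dom_gcd_with_counter m f → Pre_gcd_with_counter m f → Spec_gcd_with_counter m f (gcd_with_counter m f)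

-- ===== LEMMAS AND PROOFS =====

-- A's body only reads max/min of its two arguments, so it is symmetric.
lemma gcdA_comm (fuel : Nat) (a b : Int) : gcdA fuel a b = gcdA fuel b a := by
  cases fuel <;> simp [gcdA, max_comm, min_comm]

-- On ordered positive inputs with enough fuel, A's value is -1 or ≥ 1.
lemma gcdA_pos : ∀ (fuel : Nat) (l s : Int), 1 ≤ s → s ≤ l → s.toNat < fuel →
    gcdA fuel l s = -1 ∨ 1 ≤ gcdA fuel l s := by
  intro fuel
  induction fuel with
  | zero => intro l s _ _ h; omega
  | succ n ih =>
    intro l s hs hsl _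
    have hs' : 0 < s := by omega
    have hmax : max l s = l := max_eq_left hsl
    have hmin : min l s = s := min_eq_right hsl
    have hq : 1 ≤ PySem.Int.floordiv l s :=
      (PySem.Int.le_floordiv_iff_mul_le hs').mpr (by omega)
    have hr0 : 0 ≤ PySem.Int.mod l s := PySem.Int.mod_nonneg l hs'
    have hrs : PySem.Int.mod l s < s := PySem.Int.mod_lt l hs'
    by_cases hr : PySem.Int.mod l s = 0
    · by_cases h1 : s = 1
      · right
        subst h1
        simp [gcdA, hmax, hmin]
        omega
      · left; simp [gcdA, hmax, hmin, hr, h1]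
    · have hrecomm : gcdA n (PySem.Int.mod l s) s = gcdA n s (PySem.Int.mod l s) :=
        gcdA_comm n _ _
      have hres := ih s (PySem.Int.mod l s) (by omega) (by omega) (by omega)
      simp only [gcdA, hmax, hmin, beq_iff_eq, hr, if_false, hrecomm]
      rcases hres with h | h
      · left; simp [h]
      · have hne : gcdA n s (PySem.Int.mod l s) ≠ -1 := by omega
        right; simp [hne]; omega

-- The loop with accumulator computes A's ordered value shifted by the accumulator.
lemma gcdB_eq_gcdA : ∀ (fuel : Nat) (l s acc : Int), 1 ≤ s → s ≤ l → s.toNat < fuel →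
    gcdBLoop fuel l s acc = if gcdA fuel l s = -1 then -1 else gcdA fuel l s + acc := by
  intro fuel
  induction fuel with
  | zero => intro l s acc _ _ h; omega
  | succ n ih =>
    intro l s acc hs hsl _
    have hs' : 0 < s := by omega
    have hmax : max l s = l := max_eq_left hsl
    have hmin : min l s = s := min_eq_right hsl
    have hr0 : 0 ≤ PySem.Int.mod l s := PySem.Int.mod_nonneg l hs'
    have hrs : PySem.Int.mod l s < s := PySem.Int.mod_lt l hs'
    have hq : 1 ≤ PySem.Int.floordiv l s :=
      (PySem.Int.le_floordiv_iff_mul_le hs').mpr (by omega)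
    by_cases hr : PySem.Int.mod l s = 0
    · by_cases h1 : s = 1
      · have hd : PySem.Int.floordiv l s = l / s := PySem.Int.floordiv_eq_ediv_of_pos (a := l) hs'
        have hl : l / (1:Int) = l := by simp
        subst h1
        simp only [gcdA, gcdBLoop, hmax, hmin, beq_iff_eq, hr, if_true, hd, hl]
        have : l ≠ -1 := by omega
        simp [this]; omega
      · simp [gcdA, gcdBLoop, hmax, hmin, hr, h1]
    · have hrecomm : gcdA n (PySem.Int.mod l s) s = gcdA n s (PySem.Int.mod l s) :=
        gcdA_comm n _ _
      have hres := gcdA_pos n s (PySem.Int.mod l s) (by omega) (by omega) (by omega)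
      have hih := ih s (PySem.Int.mod l s) (acc + PySem.Int.floordiv l s)
        (by omega) (by omega) (by omega)
      simp only [gcdA, gcdBLoop, hmax, hmin, beq_iff_eq, hr, if_false, hrecomm, hih]
      rcases hres with h | h
      · simp [h]
      · have hne : gcdA n s (PySem.Int.mod l s) ≠ -1 := by omega
        have hne2 : gcdA n s (PySem.Int.mod l s) + PySem.Int.floordiv l s ≠ -1 := by omega
        simp [hne, hne2]; omega

-- ===== VERDICT (by name: the statement is the Claim_ definition above) =====
theorem gcd_with_counter_spec : Claim_equal_gcd_with_counter := by
  intro m f _ hpre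
  unfold Spec_gcd_with_counter gcd_with_counter gcd_with_counter_alt
  rcases hpre with ⟨hm, hf⟩ | ⟨hneg, hdvd⟩
  · -- positive case: both equal the ordered Euclid value
    set s := min m f with hsdef
    set l := max m f with hldef
    have hs : 1 ≤ s := le_min hm hf
    have hsl : s ≤ l := min_le_max
    have hna : s.toNat = s.natAbs := by omega
    rw [hna]
    have hfuel : s.toNat < s.natAbs + 1 := by omega
    have hB := gcdB_eq_gcdA (s.natAbs + 1) l s 0 hs hsl hfuel
    have hA : gcdA (s.natAbs + 1) m f = gcdA (s.natAbs + 1) l s := by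
      rcases le_total m f with h | h
      · rw [hldef, hsdef, max_eq_right h, min_eq_left h, gcdA_comm]
      · rw [hldef, hsdef, max_eq_left h, min_eq_right h]
    rw [hA, hB]
    split_ifs with h
    · exact h
    · omega
  · -- min < 0 dividing max: first remainder is 0, both return -1
    have htn : (min m f).toNat = 0 := by omega
    have hr : PySem.Int.mod (max m f) (min m f) = 0 :=
      (PySem.Int.mod_eq_zero_iff_dvd _ _).mpr hdvd
    have h1 : min m f ≠ 1 := by omega
    have hmmf : max (max m f) (min m f) = max m f := max_eq_left min_le_max
    have hmmf2 : min (max m f) (min m f) = min m f := min_eq_right min_le_max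
    have hA : gcdA (0 + 1) m f = gcdA (0 + 1) (max m f) (min m f) := by
      rcases le_total m f with h | h
      · rw [max_eq_right h, min_eq_left h, gcdA_comm]
      · rw [max_eq_left h, min_eq_right h]
    have hB : gcdBLoop ((min m f).natAbs + 1) (max m f) (min m f) 0 = -1 := by
      simp [gcdBLoop, hr, h1]
    rw [htn, hA, hB]
    simp [gcdA, hr, h1]
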